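-- pv_equiv track=rewrite | github.com/Anastasios-Vlachmpeis/CBWPPS--Plate-Wine-Pairing-System | batch_profiler.py | _suggest_wine_type
-- ===== SOURCE A (Python) =====
-- from typing import Dict, List, Any, Optional
--
-- def _suggest_wine_type(dominant_flavors: List[str], compounds: List[str]) -> str:
--     """
--     Suggest wine type based on dominant flavors and compounds
--
--     Args:
--         dominant_flavors: List of flavor tags
--         compounds: List of chemical compounds
--
--     Returns:
--         Suggested wine type (Red, White, Rosé, Sparkling, Dessert)
--     """
--     flavors_lower = [f.lower() for f in dominant_flavors]
--     compounds_lower = [c.lower() for c in compounds]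
--
--     # Simple heuristic-based suggestions
--     if any(f in flavors_lower for f in ['spicy', 'rich', 'heavy', 'umami', 'meaty']):
--         return "Red"
--     elif any(f in flavors_lower for f in ['light', 'acidic', 'citrus', 'fresh', 'crisp']):
--         return "White"
--     elif any(f in flavors_lower for f in ['sweet', 'dessert', 'creamy']):
--         return "Dessert"
--     elif any(f in flavors_lower for f in ['celebratory', 'bubbly']):
--         return "Sparkling"
--     else:
--         # Default based on compounds (terpenes often in whites)
--         if any('citral' in c or 'geraniol' in c or 'linalool' in c for c in compounds_lower):
--             return "White"
--         return "Red"  # Default fallback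
-- ===== SOURCE B (Python) =====
-- # Single pass over the flavors: each flavor is ranked via a keyword->priority dict
-- # and only the minimum rank is kept; the rank is then mapped to a wine, with the
-- # compound-substring fallback when no keyword matched.
--
-- _RANK = {
--     'spicy': 0, 'rich': 0, 'heavy': 0, 'umami': 0, 'meaty': 0,
--     'light': 1, 'acidic': 1, 'citrus': 1, 'fresh': 1, 'crisp': 1,
--     'sweet': 2, 'dessert': 2, 'creamy': 2,
--     'celebratory': 3, 'bubbly': 3,
-- }
--
-- _WINE_OF = {0: "Red", 1: "White", 2: "Dessert", 3: "Sparkling"}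
--
-- _WHITE_HINTS = ('citral', 'geraniol', 'linalool')
--
--
-- def _suggest_wine_type(dominant_flavors, compounds):
--     best = 4
--     for f in dominant_flavors:
--         r = _RANK.get(f.lower(), 4)
--         if r < best:
--             best = r
--     wine = _WINE_OF.get(best)
--     if wine is not None:
--         return wine
--     if any(h in c.lower() for c in compounds for h in _WHITE_HINTS):
--         return "White"
--     return "Red"
-- ===== Notes on version B (the rewrite author's own statement) =====
-- stated objective: alternative
-- what changed: Replaces A's four-branch ladder of keyword-group scans with a single pass over the flavors that ranks each flavor via a keyword-to-priority dict and keeps only the minimum rank, then maps the rank to a wine through a rank-to-wine dict; the compound substring fallback fires only when no keyword matched (rank 4).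
import Mathlib
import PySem

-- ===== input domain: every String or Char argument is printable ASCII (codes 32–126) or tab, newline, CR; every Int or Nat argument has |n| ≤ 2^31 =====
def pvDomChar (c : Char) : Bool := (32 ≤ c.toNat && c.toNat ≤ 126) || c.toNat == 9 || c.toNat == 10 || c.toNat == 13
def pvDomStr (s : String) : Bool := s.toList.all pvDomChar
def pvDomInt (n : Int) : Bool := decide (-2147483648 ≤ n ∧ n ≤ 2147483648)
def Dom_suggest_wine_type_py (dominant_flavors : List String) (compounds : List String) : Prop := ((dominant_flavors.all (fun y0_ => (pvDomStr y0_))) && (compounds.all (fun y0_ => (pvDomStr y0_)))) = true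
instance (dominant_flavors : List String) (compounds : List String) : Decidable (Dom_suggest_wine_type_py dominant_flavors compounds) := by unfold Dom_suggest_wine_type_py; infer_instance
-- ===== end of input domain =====

-- B replaces A's four-branch ladder of keyword-group scans by a single pass over the flavors
-- keeping the minimum priority rank from a keyword→rank dict, then a rank→wine dict lookup;
-- objective: alternative (same cost class, different algorithm).

-- ===== PORT A =====
def suggest_wine_type_py (dominant_flavors : List String) (compounds : List String) : String :=
  let flavors_lower := dominant_flavors.map PySem.Str.lower
  let compounds_lower := compounds.map PySem.Str.lower
  if ["spicy", "rich", "heavy", "umami", "meaty"].any (fun f => flavors_lower.contains f) then "Red"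
  else if ["light", "acidic", "citrus", "fresh", "crisp"].any (fun f => flavors_lower.contains f) then "White"
  else if ["sweet", "dessert", "creamy"].any (fun f => flavors_lower.contains f) then "Dessert"
  else if ["celebratory", "bubbly"].any (fun f => flavors_lower.contains f) then "Sparkling"
  else if compounds_lower.any (fun c =>
      PySem.Str.isIn "citral" c || PySem.Str.isIn "geraniol" c || PySem.Str.isIn "linalool" c) then "White"
  else "Red"

-- ===== PORT B =====
-- the keyword→priority dict _RANK of Source B (literal dict, distinct keys)
def pvRank : PySem.Dict String Int := PySem.Dict.mk
  [("spicy", 0), ("rich", 0), ("heavy", 0), ("umami", 0), ("meaty", 0),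
   ("light", 1), ("acidic", 1), ("citrus", 1), ("fresh", 1), ("crisp", 1),
   ("sweet", 2), ("dessert", 2), ("creamy", 2),
   ("celebratory", 3), ("bubbly", 3)]

-- the rank→wine dict _WINE_OF of Source B
def pvWineOf : PySem.Dict Int String := PySem.Dict.mk
  [(0, "Red"), (1, "White"), (2, "Dessert"), (3, "Sparkling")]

def pvWhiteHints : List String := ["citral", "geraniol", "linalool"]

def suggest_wine_type_py_alt (dominant_flavors : List String) (compounds : List String) : String :=
  -- 'best = 4; for f in dominant_flavors: r = _RANK.get(f.lower(), 4); if r < best: best = r'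
  let best := dominant_flavors.foldl
    (fun best f =>
      let r := PySem.Dict.getD pvRank (PySem.Str.lower f) 4
      if r < best then r else best) 4
  match PySem.Dict.get? pvWineOf best with
  | some wine => wine
  | none =>
      if compounds.any (fun c => pvWhiteHints.any (fun h => PySem.Str.isIn h (PySem.Str.lower c)))
      then "White" else "Red"

-- ===== PRECONDITION & SPEC =====
def Spec_suggest_wine_type_py (dominant_flavors : List String) (compounds : List String) (out : String) : Prop := out = suggest_wine_type_py_alt dominant_flavors compounds
instance (dominant_flavors : List String) (compounds : List String) (out : String) : Decidable (Spec_suggest_wine_type_py dominant_flavors compounds out) := by unfold Spec_suggest_wine_type_py; infer_instance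

-- ===== CLAIM (what is proved, stated in full; the proofs are below) =====
def Claim_equal_suggest_wine_type_py : Prop := ∀ (dominant_flavors : List String) (compounds : List String), Dom_suggest_wine_type_py dominant_flavors compounds → Spec_suggest_wine_type_py dominant_flavors compounds (suggest_wine_type_py dominant_flavors compounds)

-- ===== LEMMAS AND PROOFS =====

-- the rank a flavor keyword gets from _RANK as an explicit tier case split
theorem rk_eq (t : String) :
    PySem.Dict.getD pvRank t 4 =
      if ["spicy", "rich", "heavy", "umami", "meaty"].contains t then 0
      else if ["light", "acidic", "citrus", "fresh", "crisp"].contains t then 1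
      else if ["sweet", "dessert", "creamy"].contains t then 2
      else if ["celebratory", "bubbly"].contains t then 3 else 4 := by
  by_cases h1 : "spicy" = t;       · subst h1; decide
  by_cases h2 : "rich" = t;        · subst h2; decide
  by_cases h3 : "heavy" = t;       · subst h3; decide
  by_cases h4 : "umami" = t;       · subst h4; decide
  by_cases h5 : "meaty" = t;       · subst h5; decide
  by_cases h6 : "light" = t;       · subst h6; decide
  by_cases h7 : "acidic" = t;      · subst h7; decide
  by_cases h8 : "citrus" = t;      · subst h8; decide
  by_cases h9 : "fresh" = t;       · subst h9; decide
  by_cases h10 : "crisp" = t;      · subst h10; decide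
  by_cases h11 : "sweet" = t;      · subst h11; decide
  by_cases h12 : "dessert" = t;    · subst h12; decide
  by_cases h13 : "creamy" = t;     · subst h13; decide
  by_cases h14 : "celebratory" = t; · subst h14; decide
  by_cases h15 : "bubbly" = t;     · subst h15; decide
  simp only [pvRank, PySem.Dict.getD, PySem.Dict.get?_mk_cons, beq_iff_eq,
    if_neg h1, if_neg h2, if_neg h3, if_neg h4, if_neg h5, if_neg h6, if_neg h7,
    if_neg h8, if_neg h9, if_neg h10, if_neg h11, if_neg h12, if_neg h13,
    if_neg h14, if_neg h15]
  simp [PySem.Dict.get?, List.contains_eq_mem, Ne.symm h1, Ne.symm h2, Ne.symm h3,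
    Ne.symm h4, Ne.symm h5, Ne.symm h6, Ne.symm h7, Ne.symm h8, Ne.symm h9, Ne.symm h10,
    Ne.symm h11, Ne.symm h12, Ne.symm h13, Ne.symm h14, Ne.symm h15]

-- the keyword rank is between 0 and 4
theorem rk_bounds (t : String) :
    0 ≤ PySem.Dict.getD pvRank t 4 ∧ PySem.Dict.getD pvRank t 4 ≤ 4 := by
  rw [rk_eq]; split_ifs <;> omega

-- B's loop is a running minimum: it never exceeds the initial value
theorem fold_le_init (g : String → Int) (l : List String) (b : Int) :
    l.foldl (fun best f => let r := g f; if r < best then r else best) b ≤ b := by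
  induction l generalizing b with
  | nil => simp
  | cons x xs ih =>
      simp only [List.foldl_cons]
      refine le_trans (ih _) ?_
      dsimp only; split_ifs <;> omega

-- the running minimum is ≤ the rank of every element
theorem fold_le_of_mem (g : String → Int) (l : List String) (b : Int) (x : String)
    (hx : x ∈ l) :
    l.foldl (fun best f => let r := g f; if r < best then r else best) b ≤ g x := by
  induction l generalizing b with
  | nil => cases hx
  | cons y ys ih =>
      simp only [List.foldl_cons]
      rcases List.mem_cons.mp hx with h | h
      · subst h
        refine le_trans (fold_le_init g ys _) ?_
        dsimp only; split_ifs <;> omega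
      · exact ih _ h

-- a lower bound on all ranks and on the start is a lower bound on the running minimum
theorem le_fold (g : String → Int) (l : List String) (b c : Int)
    (hb : c ≤ b) (h : ∀ x ∈ l, c ≤ g x) :
    c ≤ l.foldl (fun best f => let r := g f; if r < best then r else best) b := by
  induction l generalizing b with
  | nil => simpa
  | cons y ys ih =>
      simp only [List.foldl_cons]
      have hy := h y (List.mem_cons_self ..)
      refine ih _ ?_ (fun x hx => h x (List.mem_cons_of_mem _ hx))
      dsimp only; split_ifs <;> omega

-- A's keyword-group scan over the lowered flavors, rephrased as a scan over the flavors
theorem any_contains_comm (kws : List String) (l : List String) :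
    (kws.any fun f => (l.map PySem.Str.lower).contains f)
      = l.any fun x => kws.contains (PySem.Str.lower x) := by
  rw [Bool.eq_iff_iff]
  simp only [List.any_eq_true, List.contains_eq_mem, List.mem_map, decide_eq_true_eq]
  constructor
  · rintro ⟨k, hk, x, hx, hlx⟩; exact ⟨x, hx, hlx ▸ hk⟩
  · rintro ⟨x, hx, hk⟩; exact ⟨_, hk, x, hx, rfl⟩

-- the compound fallback conditions agree
theorem fallback_eq (compounds : List String) :
    ((compounds.map PySem.Str.lower).any (fun c =>
        PySem.Str.isIn "citral" c || PySem.Str.isIn "geraniol" c || PySem.Str.isIn "linalool" c))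
      = compounds.any (fun c => pvWhiteHints.any (fun h => PySem.Str.isIn h (PySem.Str.lower c))) := by
  simp [List.any_map, pvWhiteHints, Function.comp_def, Bool.or_assoc]

-- ===== VERDICT (by name: the statement is the Claim_ definition above) =====
theorem suggest_wine_type_py_spec : Claim_equal_suggest_wine_type_py := by
  intro df cs _
  unfold Spec_suggest_wine_type_py suggest_wine_type_py suggest_wine_type_py_alt
  simp only [any_contains_comm, fallback_eq]
  set g : String → Int := fun f => PySem.Dict.getD pvRank (PySem.Str.lower f) 4 with hg
  set m := df.foldl (fun best f => let r := g f; if r < best then r else best) 4 with hm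
  by_cases h1 : df.any (fun x => (["spicy", "rich", "heavy", "umami", "meaty"] : List String).contains (PySem.Str.lower x)) = true
  · obtain ⟨x, hx, hk⟩ := List.any_eq_true.mp h1
    have hr : g x = 0 := by rw [hg]; dsimp only; rw [rk_eq, if_pos hk]
    have h0 : m = 0 := by
      have hle := fold_le_of_mem g df 4 x hx
      have hlo := le_fold g df 4 0 (by omega) (fun y _ => (rk_bounds _).1)
      omega
    rw [if_pos h1, h0]; rfl
  have hge1 : ∀ x ∈ df, ¬((["spicy", "rich", "heavy", "umami", "meaty"] : List String).contains (PySem.Str.lower x) = true) :=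
    fun x hx hk => h1 (List.any_eq_true.mpr ⟨x, hx, hk⟩)
  by_cases h2 : df.any (fun x => (["light", "acidic", "citrus", "fresh", "crisp"] : List String).contains (PySem.Str.lower x)) = true
  · obtain ⟨x, hx, hk⟩ := List.any_eq_true.mp h2
    have hr : g x = 1 := by
      rw [hg]; dsimp only; rw [rk_eq, if_neg (hge1 x hx), if_pos hk]
    have h0 : m = 1 := by
      have hle := fold_le_of_mem g df 4 x hx
      have hlo := le_fold g df 4 1 (by omega) ?_
      · omega
      intro y hy
      rw [hg]; dsimp only; rw [rk_eq, if_neg (hge1 y hy)]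
      split_ifs <;> omega
    rw [if_neg h1, if_pos h2, h0]; rfl
  have hge2 : ∀ x ∈ df, ¬((["light", "acidic", "citrus", "fresh", "crisp"] : List String).contains (PySem.Str.lower x) = true) :=
    fun x hx hk => h2 (List.any_eq_true.mpr ⟨x, hx, hk⟩)
  by_cases h3 : df.any (fun x => (["sweet", "dessert", "creamy"] : List String).contains (PySem.Str.lower x)) = true
  · obtain ⟨x, hx, hk⟩ := List.any_eq_true.mp h3
    have hr : g x = 2 := by
      rw [hg]; dsimp only
      rw [rk_eq, if_neg (hge1 x hx), if_neg (hge2 x hx), if_pos hk]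
    have h0 : m = 2 := by
      have hle := fold_le_of_mem g df 4 x hx
      have hlo := le_fold g df 4 2 (by omega) ?_
      · omega
      intro y hy
      rw [hg]; dsimp only; rw [rk_eq, if_neg (hge1 y hy), if_neg (hge2 y hy)]
      split_ifs <;> omega
    rw [if_neg h1, if_neg h2, if_pos h3, h0]; rfl
  have hge3 : ∀ x ∈ df, ¬((["sweet", "dessert", "creamy"] : List String).contains (PySem.Str.lower x) = true) :=
    fun x hx hk => h3 (List.any_eq_true.mpr ⟨x, hx, hk⟩)
  by_cases h4 : df.any (fun x => (["celebratory", "bubbly"] : List String).contains (PySem.Str.lower x)) = true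
  · obtain ⟨x, hx, hk⟩ := List.any_eq_true.mp h4
    have hr : g x = 3 := by
      rw [hg]; dsimp only
      rw [rk_eq, if_neg (hge1 x hx), if_neg (hge2 x hx), if_neg (hge3 x hx), if_pos hk]
    have h0 : m = 3 := by
      have hle := fold_le_of_mem g df 4 x hx
      have hlo := le_fold g df 4 3 (by omega) ?_
      · omega
      intro y hy
      rw [hg]; dsimp only
      rw [rk_eq, if_neg (hge1 y hy), if_neg (hge2 y hy), if_neg (hge3 y hy)]
      split_ifs <;> omega
    rw [if_neg h1, if_neg h2, if_neg h3, if_pos h4, h0]; rfl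
  · have hge4 : ∀ x ∈ df, ¬((["celebratory", "bubbly"] : List String).contains (PySem.Str.lower x) = true) :=
      fun x hx hk => h4 (List.any_eq_true.mpr ⟨x, hx, hk⟩)
    have h0 : m = 4 := by
      have hle := fold_le_init g df 4
      have hlo := le_fold g df 4 4 (by omega) ?_
      · omega
      intro y hy
      rw [hg]; dsimp only
      rw [rk_eq, if_neg (hge1 y hy), if_neg (hge2 y hy), if_neg (hge3 y hy), if_neg (hge4 y hy)]
    rw [if_neg h1, if_neg h2, if_neg h3, if_neg h4, h0]; rfl
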